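-- pv_equiv track=rewrite | github.com/timnirmal/Research-YT-Final- | Process_Audio/New_Hate_Sentiment/1.py | isSuffix
-- ===== SOURCE A (Python) =====
-- def isSuffix(s1, s2):
--     n1 = len(s1)
--     n2 = len(s2)
--     if (n1 > n2):
--         return False
--     for i in range(n1):
--         if (s1[n1 - i - 1] != s2[n2 - i - 1]):
--             return False
--     return True
-- ===== SOURCE B (Python) =====
-- def isSuffix(s1, s2):
--     return s1 == s2[len(s2) - len(s1):]
-- ===== Notes on version B (the rewrite author's own statement) =====
-- stated objective: simpler
-- what changed: Replaces the length guard and reverse-index character loop with a single tail slice and one forward string comparison.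
import Mathlib
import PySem

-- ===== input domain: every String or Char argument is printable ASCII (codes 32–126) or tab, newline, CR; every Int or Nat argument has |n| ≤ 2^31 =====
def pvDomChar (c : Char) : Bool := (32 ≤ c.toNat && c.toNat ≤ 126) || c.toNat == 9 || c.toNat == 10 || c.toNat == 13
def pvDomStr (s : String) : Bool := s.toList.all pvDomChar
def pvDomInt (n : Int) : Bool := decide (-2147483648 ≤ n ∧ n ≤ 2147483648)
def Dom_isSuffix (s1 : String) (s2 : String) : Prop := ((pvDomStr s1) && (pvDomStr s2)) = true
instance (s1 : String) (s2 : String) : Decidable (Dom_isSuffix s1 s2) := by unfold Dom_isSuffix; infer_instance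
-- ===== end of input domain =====

-- B replaces A's length guard and reverse-index character loop by one tail slice plus a single forward comparison (simpler).

-- ===== PORT A =====
-- guard 'n1 > n2', then 'for i in range(n1)' with early return False == short-circuit all
def isSuffix (s1 : String) (s2 : String) : Bool :=
  let l1 := s1.toList
  let l2 := s2.toList
  let n1 : Int := l1.length
  let n2 : Int := l2.length
  if n1 > n2 then false
  else
    (PySem.List.pyRange 0 n1 1).all (fun i =>
      PySem.List.pyGetD l1 (n1 - i - 1) ' ' == PySem.List.pyGetD l2 (n2 - i - 1) ' ')

-- ===== PORT B =====
-- s1 == s2[len(s2)-len(s1):]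
def isSuffix_alt (s1 : String) (s2 : String) : Bool :=
  let l1 := s1.toList
  let l2 := s2.toList
  l1 == PySem.List.slice l2 (some ((l2.length : Int) - (l1.length : Int))) none

-- ===== PRECONDITION & SPEC =====
def Spec_isSuffix (s1 : String) (s2 : String) (out : Bool) : Prop := out = isSuffix_alt s1 s2
instance (s1 : String) (s2 : String) (out : Bool) : Decidable (Spec_isSuffix s1 s2 out) := by unfold Spec_isSuffix; infer_instance

-- ===== CLAIM (what is proved, stated in full; the proofs are below) =====
def Claim_equal_isSuffix : Prop := ∀ (s1 : String) (s2 : String), Dom_isSuffix s1 s2 → Spec_isSuffix s1 s2 (isSuffix s1 s2)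

-- ===== LEMMAS AND PROOFS =====

-- On lists: A's reverse-index scan agrees with B's tail-slice comparison.
theorem isSuffix_lists (l1 l2 : List Char) :
    (if (l1.length : Int) > (l2.length : Int) then false
     else (PySem.List.pyRange 0 (l1.length : Int) 1).all (fun i =>
        PySem.List.pyGetD l1 ((l1.length : Int) - i - 1) ' '
          == PySem.List.pyGetD l2 ((l2.length : Int) - i - 1) ' '))
    = (l1 == PySem.List.slice l2 (some ((l2.length : Int) - (l1.length : Int))) none) := by
  by_cases hgt : (l1.length : Int) > (l2.length : Int)
  · -- A returns false; B compares l1 with a strictly shorter slice, so false too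
    rw [if_pos hgt]
    rw [PySem.List.slice_some_none]
    have hle := PySem.List.clampIdx_le l2.length ((l2.length : Int) - (l1.length : Int))
    have hlen : (l2.drop (PySem.List.clampIdx l2.length ((l2.length : Int) - (l1.length : Int)))).length < l1.length := by
      simp [List.length_drop]; omega
    symm
    rw [beq_eq_false_iff_ne]
    intro h
    have := congrArg List.length h
    omega
  · rw [if_neg hgt]
    rw [not_lt] at hgt
    have hle : l1.length ≤ l2.length := by exact_mod_cast hgt
    have ha : (0:Int) ≤ (l2.length : Int) - (l1.length : Int) := by omega
    rw [PySem.List.slice_from l2 ha]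
    have hk : ((l2.length : Int) - (l1.length : Int)).toNat = l2.length - l1.length := by omega
    rw [hk]
    rw [PySem.List.pyRange_zero_natCast]
    rw [Bool.eq_iff_iff]
    simp only [List.all_map, List.all_eq_true, List.mem_range, Function.comp, beq_iff_eq]
    constructor
    · intro h
      apply List.ext_getElem
      · simp [List.length_drop]; omega
      · intro j hj1 hj2
        have hjlt : j < l1.length := hj1
        have := h (l1.length - 1 - j) (by omega)
        rw [PySem.List.pyGetD_eq_getElem l1 ' ' (by omega) (by omega)] at this
        rw [PySem.List.pyGetD_eq_getElem l2 ' ' (by omega) (by omega)] at this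
        have e1 : ((l1.length : Int) - ↑(l1.length - 1 - j) - 1).toNat = j := by omega
        have e2 : ((l2.length : Int) - ↑(l1.length - 1 - j) - 1).toNat = l2.length - l1.length + j := by omega
        simp only [e1, e2] at this
        rw [List.getElem_drop]
        exact this
    · intro h i hi
      rw [PySem.List.pyGetD_eq_getElem l1 ' ' (by omega) (by omega)]
      rw [PySem.List.pyGetD_eq_getElem l2 ' ' (by omega) (by omega)]
      have e1 : ((l1.length : Int) - (i : Int) - 1).toNat = l1.length - 1 - i := by omega
      have e2 : ((l2.length : Int) - (i : Int) - 1).toNat = (l2.length - l1.length) + (l1.length - 1 - i) := by omega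
      simp only [e1, e2]
      have hj : l1.length - 1 - i < (l2.drop (l2.length - l1.length)).length := by
        simp [List.length_drop]; omega
      have := congrArg (fun l : List Char => l[l1.length - 1 - i]?) h
      simp only [List.getElem?_drop] at this
      rw [List.getElem?_eq_getElem (by omega), List.getElem?_eq_getElem (by omega)] at this
      exact Option.some.inj this

-- ===== VERDICT (by name: the statement is the Claim_ definition above) =====
theorem isSuffix_spec : Claim_equal_isSuffix := by
  intro s1 s2 _
  show isSuffix s1 s2 = isSuffix_alt s1 s2
  simpa [isSuffix, isSuffix_alt] using isSuffix_lists s1.toList s2.toList
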